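-- pv_equiv track=rewrite | github.com/Anubhav722/blahblah | jarvis/resume/utils/parser_helper.py | check_hamming_distance
-- ===== SOURCE A (Python) =====
-- def hash_distance(sim_hash_one, sim_hash_two):
--     """
--     Calculates hamming distance between two sim hashes.
--     :param sim_hash_one: long - sim hash
--     :param sim_hash_two: long - sim hash
--     :return: (int) returns hamming distance.
--     """
--     f = 128
--     x = (sim_hash_one ^ sim_hash_two) & ((1 << f) - 1)
--     ans = 0
--     while x:
--         ans += 1
--         x &= x - 1
--     return ans
--
-- def check_hamming_distance(list_hash_values, new_hash_value):
--     """
--     This Function Checks for if the newly generated hash value from the resume matches with any hash value in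
--     the database
--     :param list_hash_values(list) - list of all the hash values from the database
--     :param new_hash_value(long) - newly generated hash value from the uploaded resume.
--     :returns:
--     """
--     hamming_distance_threshold = 1
--     hamming_distance = []
--     for value in list_hash_values:
--         hamming_distance.append(hash_distance(int(value), new_hash_value))
--
--     for i, distance in enumerate(hamming_distance):
--         if distance < hamming_distance_threshold:
--             return True, list_hash_values[i]
--     return False, 0
-- ===== SOURCE B (Python) =====
-- def check_hamming_distance(list_hash_values, new_hash_value):
--     # Threshold is 1, so a match means hamming distance 0, i.e. the two
--     # hashes agree on their low 128 bits: compare masked values directly,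
--     # no popcount and no intermediate distance list.
--     mask = (1 << 128) - 1
--     target = new_hash_value & mask
--     for value in list_hash_values:
--         if int(value) & mask == target:
--             return True, value
--     return False, 0
-- ===== Notes on version B (the rewrite author's own statement) =====
-- stated objective: faster
-- what changed: Since the threshold is 1, a match means hamming distance 0, so B drops the popcount and the intermediate distance list entirely and returns the first stored value whose low 128 bits equal the new hash's, stopping at the first match.
import Mathlib
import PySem

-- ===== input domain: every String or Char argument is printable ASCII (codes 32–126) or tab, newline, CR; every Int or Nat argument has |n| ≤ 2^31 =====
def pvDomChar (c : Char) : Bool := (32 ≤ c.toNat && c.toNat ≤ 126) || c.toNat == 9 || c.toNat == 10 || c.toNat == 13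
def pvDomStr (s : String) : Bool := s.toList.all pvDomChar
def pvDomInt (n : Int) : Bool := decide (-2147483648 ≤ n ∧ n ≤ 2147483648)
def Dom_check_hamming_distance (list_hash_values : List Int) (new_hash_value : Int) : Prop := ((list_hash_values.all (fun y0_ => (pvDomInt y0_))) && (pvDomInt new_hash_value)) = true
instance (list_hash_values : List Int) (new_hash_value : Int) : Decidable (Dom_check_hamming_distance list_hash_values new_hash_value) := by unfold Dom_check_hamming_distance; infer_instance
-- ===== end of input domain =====

-- B drops A's popcount and intermediate distance list: with threshold 1 a match means
-- hamming distance 0, i.e. equality of the hashes' low 128 bits.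

-- ===== PORT A =====
-- 'while x: ans += 1; x &= x - 1' as structural recursion on x (x &&& (x-1) < x).
def pvPopcount (x : Nat) : Nat :=
  if h : x = 0 then 0
  else pvPopcount (x &&& (x - 1)) + 1
decreasing_by
  have h1 : x &&& (x - 1) ≤ x - 1 := Nat.and_le_right
  omega

-- Python's (a ^ b) & ((1 << 128) - 1) is exactly Nat xor of the two's-complement
-- residues a mod 2^128 and b mod 2^128 (Int.emod with positive divisor = Python %).
def hash_distance (sim_hash_one sim_hash_two : Int) : Int :=
  let x : Nat := ((sim_hash_one.emod (2 ^ 128)).toNat) ^^^ ((sim_hash_two.emod (2 ^ 128)).toNat)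
  (pvPopcount x : Int)

-- second loop of A: scan the distance list (paired with the stored value it indexes;
-- list_hash_values[i] is the value zipped with distance i)
def pvLoopA (pairs : List (Int × Int)) : Bool × Int :=
  match pairs with
  | [] => (false, 0)
  | (v, d) :: rest => if d < 1 then (true, v) else pvLoopA rest

def check_hamming_distance (list_hash_values : List Int) (new_hash_value : Int) : Bool × Int :=
  let hamming_distance := list_hash_values.map (fun value => hash_distance value new_hash_value)
  pvLoopA (list_hash_values.zip hamming_distance)

-- ===== PORT B =====
-- one pass: first value whose low 128 bits (value & mask, i.e. value mod 2^128) equal target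
def pvScanB (list_hash_values : List Int) (target : Int) : Bool × Int :=
  match list_hash_values with
  | [] => (false, 0)
  | v :: rest => if v.emod (2 ^ 128) = target then (true, v) else pvScanB rest target

def check_hamming_distance_alt (list_hash_values : List Int) (new_hash_value : Int) : Bool × Int :=
  let target := new_hash_value.emod (2 ^ 128)
  pvScanB list_hash_values target

-- ===== PRECONDITION & SPEC =====
def Spec_check_hamming_distance (list_hash_values : List Int) (new_hash_value : Int) (out : Bool × Int) : Prop := out = check_hamming_distance_alt list_hash_values new_hash_value
instance (list_hash_values : List Int) (new_hash_value : Int) (out : Bool × Int) : Decidable (Spec_check_hamming_distance list_hash_values new_hash_value out) := by unfold Spec_check_hamming_distance; infer_instance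

-- ===== CLAIM (what is proved, stated in full; the proofs are below) =====
def Claim_equal_check_hamming_distance : Prop := ∀ (list_hash_values : List Int) (new_hash_value : Int), Dom_check_hamming_distance list_hash_values new_hash_value → Spec_check_hamming_distance list_hash_values new_hash_value (check_hamming_distance list_hash_values new_hash_value)

-- ===== LEMMAS AND PROOFS =====

theorem pvPopcount_eq_zero (x : Nat) : pvPopcount x = 0 ↔ x = 0 := by
  constructor
  · intro h
    by_contra hx
    rw [pvPopcount, dif_neg hx] at h
    omega
  · intro h; subst h; rw [pvPopcount]; simp

theorem hash_distance_lt_one (a b : Int) :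
    hash_distance a b < 1 ↔ a.emod (2 ^ 128) = b.emod (2 ^ 128) := by
  have ha : 0 ≤ a.emod (2 ^ 128) := Int.emod_nonneg a (by norm_num)
  have hb : 0 ≤ b.emod (2 ^ 128) := Int.emod_nonneg b (by norm_num)
  have hd : hash_distance a b
      = ((pvPopcount ((a.emod (2 ^ 128)).toNat ^^^ (b.emod (2 ^ 128)).toNat) : Nat) : Int) := rfl
  rw [hd]
  constructor
  · intro h
    have h0 : pvPopcount ((a.emod (2 ^ 128)).toNat ^^^ (b.emod (2 ^ 128)).toNat) = 0 := by omega
    have := Nat.xor_eq_zero_iff.mp ((pvPopcount_eq_zero _).mp h0)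
    omega
  · intro h
    have hx : (a.emod (2 ^ 128)).toNat ^^^ (b.emod (2 ^ 128)).toNat = 0 :=
      Nat.xor_eq_zero_iff.mpr (by omega)
    rw [hx, (pvPopcount_eq_zero 0).mpr rfl]
    norm_num

theorem loopA_eq_scanB (l : List Int) (n : Int) :
    pvLoopA (l.zip (l.map (fun v => hash_distance v n))) = pvScanB l (n.emod (2 ^ 128)) := by
  induction l with
  | nil => rfl
  | cons v rest ih =>
    simp only [List.map_cons, List.zip_cons_cons, pvLoopA, pvScanB]
    by_cases h : hash_distance v n < 1
    · rw [if_pos h, if_pos ((hash_distance_lt_one v n).mp h)]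
    · rw [if_neg h, if_neg (fun he => h ((hash_distance_lt_one v n).mpr he)), ih]

-- ===== VERDICT (by name: the statement is the Claim_ definition above) =====
theorem check_hamming_distance_spec : Claim_equal_check_hamming_distance := by
  intro l n _
  show check_hamming_distance l n = check_hamming_distance_alt l n
  unfold check_hamming_distance check_hamming_distance_alt
  exact loopA_eq_scanB l n
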